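-- pv_equiv track=rewrite | github.com/smichaud/woodland-navigation | NarfResultsScripts/processing.py | compute_results
-- ===== SOURCE A (Python) =====
-- def compute_results(sorted_distances, sorted_scores, score_threshold):
--     # Compute values for distance = 0
--     fn = 0
--     fp = 0
--     tn = 0
--     tp = 0
--     pairCounts = len(sorted_distances)
--     for i in range(0, pairCounts):
--         if sorted_scores[i] > score_threshold:
--             fp = fp + 1
--         else:
--             tn = tn + 1
--
--     result_distances = [0]
--     result_fn = [0]
--     result_fp = [fp]
--     result_tn = [tn]
--     result_tp = [0]
--
--     # Loop for all pairs in ascending order by distance...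
--     # switch the old value for new value and record
--     for i in range(0, pairCounts): # Basically the pair become "in range'
--         if sorted_scores[i] > score_threshold:
--             fp = fp - 1
--             tp = tp + 1
--         else:
--             tn = tn - 1
--             fn = fn + 1
--
--         result_distances.extend([sorted_distances[i]]) # Could do it in one shot
--         result_fn.extend([fn])
--         result_fp.extend([fp])
--         result_tn.extend([tn])
--         result_tp.extend([tp])
--
--     return result_distances, result_fn, result_fp, result_tn, result_tp
-- ===== SOURCE B (Python) =====
-- def compute_results(sorted_distances, sorted_scores, score_threshold):
--     n = len(sorted_distances)
--     # Stage 1: one prefix-count list tp, tp[k] = positives among the first k scores.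
--     tp = [0]
--     for i in range(n):
--         tp.append(tp[-1] + (1 if sorted_scores[i] > score_threshold else 0))
--     total_fp = tp[-1]
--     total_tn = n - total_fp
--     # Stage 2: every output list is a pure arithmetic map over tp / the index.
--     result_distances = [0] + list(sorted_distances)
--     result_fn = [j - tp[j] for j in range(n + 1)]
--     result_fp = [total_fp - x for x in tp]
--     result_tn = [total_tn - (j - tp[j]) for j in range(n + 1)]
--     return result_distances, result_fn, result_fp, result_tn, tp
-- ===== Notes on version B (the rewrite author's own statement) =====
-- stated objective: alternative
-- what changed: B computes a single prefix-count list tp (positives among the first k scores) and then derives all five output lists as independent arithmetic maps/comprehensions over tp and the index (fn = j - tp[j], fp = total - tp[j], tn by complement, distances by list concatenation), instead of A's single stateful loop that maintains four counters and appends to five result lists in lockstep.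
import Mathlib
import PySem

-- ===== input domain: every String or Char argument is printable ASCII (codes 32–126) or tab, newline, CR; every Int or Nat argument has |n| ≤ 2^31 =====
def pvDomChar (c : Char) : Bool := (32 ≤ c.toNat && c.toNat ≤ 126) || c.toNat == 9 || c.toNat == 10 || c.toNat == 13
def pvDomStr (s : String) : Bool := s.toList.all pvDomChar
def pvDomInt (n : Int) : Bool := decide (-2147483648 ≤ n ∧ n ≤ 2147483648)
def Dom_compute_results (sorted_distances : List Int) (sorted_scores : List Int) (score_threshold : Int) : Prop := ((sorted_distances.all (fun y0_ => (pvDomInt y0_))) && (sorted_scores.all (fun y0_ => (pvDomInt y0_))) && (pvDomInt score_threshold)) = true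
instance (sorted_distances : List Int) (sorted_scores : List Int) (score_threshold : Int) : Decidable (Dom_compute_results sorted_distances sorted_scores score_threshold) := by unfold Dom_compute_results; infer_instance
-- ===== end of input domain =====

-- B replaces A's single stateful loop over four counters by one prefix-count list tp and
-- four independent arithmetic maps deriving fn/fp/tn from tp (alternative decomposition).

-- ===== PORT A =====
def compute_results (sorted_distances : List Int) (sorted_scores : List Int) (score_threshold : Int) : List Int × List Int × List Int × List Int × List Int :=
  let pairCounts : Nat := sorted_distances.length
  -- first loop: fp/tn counts at distance 0 (sorted_scores[i] via pyGet?; Pre_ keeps it in range)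
  let fptn : Int × Int :=
    (PySem.List.pyRange 0 (pairCounts : Int)).foldl
      (fun (st : Int × Int) i =>
        if (PySem.List.pyGet? sorted_scores i).getD 0 > score_threshold then
          (st.1 + 1, st.2)
        else
          (st.1, st.2 + 1))
      (0, 0)
  -- second loop: state = (fn, fp, tn, tp, result_distances, result_fn, result_fp, result_tn, result_tp)
  let st :=
    (PySem.List.pyRange 0 (pairCounts : Int)).foldl
      (fun (st : Int × Int × Int × Int × List Int × List Int × List Int × List Int × List Int) i =>
        let upd : Int × Int × Int × Int :=
          if (PySem.List.pyGet? sorted_scores i).getD 0 > score_threshold then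
            (st.1, st.2.1 - 1, st.2.2.1, st.2.2.2.1 + 1)
          else
            (st.1 + 1, st.2.1, st.2.2.1 - 1, st.2.2.2.1)
        (upd.1, upd.2.1, upd.2.2.1, upd.2.2.2,
         st.2.2.2.2.1 ++ [(PySem.List.pyGet? sorted_distances i).getD 0],
         st.2.2.2.2.2.1 ++ [upd.1],
         st.2.2.2.2.2.2.1 ++ [upd.2.1],
         st.2.2.2.2.2.2.2.1 ++ [upd.2.2.1],
         st.2.2.2.2.2.2.2.2 ++ [upd.2.2.2]))
      (0, fptn.1, fptn.2, 0, [0], [0], [fptn.1], [fptn.2], [0])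
  (st.2.2.2.2.1, st.2.2.2.2.2.1, st.2.2.2.2.2.2.1, st.2.2.2.2.2.2.2.1, st.2.2.2.2.2.2.2.2)

-- ===== PORT B =====
def compute_results_alt (sorted_distances : List Int) (sorted_scores : List Int) (score_threshold : Int) : List Int × List Int × List Int × List Int × List Int :=
  let n : Nat := sorted_distances.length
  -- stage 1: tp[k] = positives among the first k scores (tp[-1] = last element, list never empty)
  let tp : List Int :=
    (PySem.List.pyRange 0 (n : Int)).foldl
      (fun (tp : List Int) i =>
        tp ++ [PySem.List.pyGetD tp (-1) 0 +
               (if (PySem.List.pyGet? sorted_scores i).getD 0 > score_threshold then 1 else 0)])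
      [0]
  let total_fp : Int := PySem.List.pyGetD tp (-1) 0
  let total_tn : Int := (n : Int) - total_fp
  -- stage 2: each output list is a pure arithmetic map
  ([0] ++ sorted_distances,
   (PySem.List.pyRange 0 ((n : Int) + 1)).map (fun j => j - PySem.List.pyGetD tp j 0),
   tp.map (fun x => total_fp - x),
   (PySem.List.pyRange 0 ((n : Int) + 1)).map (fun j => total_tn - (j - PySem.List.pyGetD tp j 0)),
   tp)

-- ===== PRECONDITION & SPEC =====
-- Pre_ excludes exactly the inputs where Python raises IndexError: both A and B index
-- sorted_scores[i] for every i < len(sorted_distances), so both raise when sorted_scores is shorter.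
def Pre_compute_results (sorted_distances : List Int) (sorted_scores : List Int) (_score_threshold : Int) : Prop :=
  sorted_distances.length ≤ sorted_scores.length
instance (sorted_distances : List Int) (sorted_scores : List Int) (score_threshold : Int) : Decidable (Pre_compute_results sorted_distances sorted_scores score_threshold) := by unfold Pre_compute_results; infer_instance

def pvWitness_compute_results : List Int × List Int × Int := ([1, 3, 7], [5, -2, 9], 4)

def Spec_compute_results (sorted_distances : List Int) (sorted_scores : List Int) (score_threshold : Int) (out : List Int × List Int × List Int × List Int × List Int) : Prop := out = compute_results_alt sorted_distances sorted_scores score_threshold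
instance (sorted_distances : List Int) (sorted_scores : List Int) (score_threshold : Int) (out : List Int × List Int × List Int × List Int × List Int) : Decidable (Spec_compute_results sorted_distances sorted_scores score_threshold out) := by unfold Spec_compute_results; infer_instance

-- ===== CLAIM (what is proved, stated in full; the proofs are below) =====
def Claim_equal_compute_results : Prop := ∀ (sorted_distances : List Int) (sorted_scores : List Int) (score_threshold : Int), Dom_compute_results sorted_distances sorted_scores score_threshold → Pre_compute_results sorted_distances sorted_scores score_threshold → Spec_compute_results sorted_distances sorted_scores score_threshold (compute_results sorted_distances sorted_scores score_threshold)

-- ===== LEMMAS AND PROOFS =====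

-- indicator of score i being a positive, and its prefix count (tp after i pairs)
def pvF (ss : List Int) (t : Int) (i : Nat) : Int :=
  if (PySem.List.pyGet? ss (i : Int)).getD 0 > t then 1 else 0

def pvS (ss : List Int) (t : Int) : Nat → Int
  | 0 => 0
  | k + 1 => pvS ss t k + pvF ss t k

-- pyRange 0 n is the cast of List.range n
theorem pv_pyRange_cast (n : Nat) :
    PySem.List.pyRange 0 (n : Int) = (List.range n).map (fun (k : Nat) => (k : Int)) := by
  rw [PySem.List.pyRange_one]
  simp

-- A's first loop: fp = S m, tn = m - S m
theorem pv_loop1 (ss : List Int) (t : Int) : ∀ (m : Nat),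
    List.foldl
      (fun (st : Int × Int) (i : Nat) =>
        if (PySem.List.pyGet? ss (i : Int)).getD 0 > t then (st.1 + 1, st.2) else (st.1, st.2 + 1))
      (0, 0) (List.range m)
    = (pvS ss t m, (m : Int) - pvS ss t m) := by
  intro m
  induction m with
  | zero => simp [pvS]
  | succ m ih =>
    rw [List.range_succ, List.foldl_append, ih]
    by_cases h : ss[m]?.getD 0 > t <;>
      simp [List.foldl_cons, List.foldl_nil, pvS, pvF, h, Prod.mk.injEq] <;>
      omega

-- last element of the tp prefix list
theorem pv_last_map_range (g : Nat → Int) (m : Nat) :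
    PySem.List.pyGetD ((List.range (m + 1)).map g) (-1) 0 = g m := by
  rw [List.range_succ, List.map_append]
  exact PySem.List.pyGetD_neg_one_append_singleton _ _ _

-- B's stage-1 loop builds exactly the prefix-count list
theorem pv_tp_char (ss : List Int) (t : Int) : ∀ (m : Nat),
    List.foldl
      (fun (tp : List Int) (i : Nat) =>
        tp ++ [PySem.List.pyGetD tp (-1) 0 +
               (if (PySem.List.pyGet? ss (i : Int)).getD 0 > t then 1 else 0)])
      [0] (List.range m)
    = (List.range (m + 1)).map (pvS ss t) := by
  intro m
  induction m with
  | zero => simp [pvS]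
  | succ m ih =>
    rw [List.range_succ, List.foldl_append, ih, List.foldl_cons, List.foldl_nil,
      pv_last_map_range]
    rw [List.range_succ (n := m + 1), List.map_append]
    simp [pvS, pvF]

-- indexing the prefix list
theorem pv_getD_map_range (g : Nat → Int) (m j : Nat) (hj : j < m) :
    PySem.List.pyGetD ((List.range m).map g) (j : Int) 0 = g j := by
  rw [PySem.List.pyGetD_natCast]
  simp [List.getD, hj]

-- A's second loop in closed form: counters and all five result lists
theorem pv_loop2 (ds ss : List Int) (t F T : Int) : ∀ (m : Nat),
    List.foldl
      (fun (st : Int × Int × Int × Int × List Int × List Int × List Int × List Int × List Int) (i : Nat) =>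
        let upd : Int × Int × Int × Int :=
          if (PySem.List.pyGet? ss (i : Int)).getD 0 > t then
            (st.1, st.2.1 - 1, st.2.2.1, st.2.2.2.1 + 1)
          else
            (st.1 + 1, st.2.1, st.2.2.1 - 1, st.2.2.2.1)
        (upd.1, upd.2.1, upd.2.2.1, upd.2.2.2,
         st.2.2.2.2.1 ++ [(PySem.List.pyGet? ds (i : Int)).getD 0],
         st.2.2.2.2.2.1 ++ [upd.1],
         st.2.2.2.2.2.2.1 ++ [upd.2.1],
         st.2.2.2.2.2.2.2.1 ++ [upd.2.2.1],
         st.2.2.2.2.2.2.2.2 ++ [upd.2.2.2]))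
      (0, F, T, 0, [0], [0], [F], [T], [0]) (List.range m)
    = ((m : Int) - pvS ss t m, F - pvS ss t m, T - ((m : Int) - pvS ss t m), pvS ss t m,
       [0] ++ (List.range m).map (fun (i : Nat) => (PySem.List.pyGet? ds (i : Int)).getD 0),
       (List.range (m + 1)).map (fun (k : Nat) => (k : Int) - pvS ss t k),
       (List.range (m + 1)).map (fun (k : Nat) => F - pvS ss t k),
       (List.range (m + 1)).map (fun (k : Nat) => T - ((k : Int) - pvS ss t k)),
       (List.range (m + 1)).map (fun (k : Nat) => pvS ss t k)) := by
  intro m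
  induction m with
  | zero => simp [pvS]
  | succ m ih =>
    rw [List.range_succ, List.foldl_append, ih, List.foldl_cons, List.foldl_nil]
    by_cases h : ss[m]?.getD 0 > t <;>
      simp [pvS, pvF, h, List.range_succ, List.append_assoc, Prod.mk.injEq] <;> omega

-- a list is the range-map of its own lookups
theorem pv_map_range_get (ds : List Int) :
    (List.range ds.length).map (fun (i : Nat) => (PySem.List.pyGet? ds (i : Int)).getD 0) = ds := by
  apply List.ext_getElem
  · simp
  · intro i h1 h2
    simp [List.getElem?_eq_getElem h2]

-- ===== VERDICT (by name: the statement is the Claim_ definition above) =====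
theorem compute_results_spec : Claim_equal_compute_results := by
  intro ds ss t _hDom _hPre
  unfold Spec_compute_results
  simp only [compute_results, compute_results_alt]
  rw [pv_pyRange_cast ds.length,
    show ((ds.length : Int) + 1) = ((ds.length + 1 : Nat) : Int) by push_cast; ring,
    pv_pyRange_cast (ds.length + 1),
    List.foldl_map, List.foldl_map, List.foldl_map,
    pv_loop1, pv_loop2, pv_tp_char, pv_last_map_range,
    List.map_map, List.map_map]
  dsimp only
  simp only [Prod.mk.injEq]
  refine ⟨?_, ?_, ?_, ?_, ?_⟩
  · rw [pv_map_range_get]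
  · refine (List.map_congr_left ?_).symm
    intro j hj
    have hj' : j < ds.length + 1 := by simpa using hj
    simp only [Function.comp_apply]
    rw [pv_getD_map_range _ _ _ hj']
  · simp [Function.comp_def]
  · rw [List.map_map]
    refine (List.map_congr_left ?_).symm
    intro j hj
    have hj' : j < ds.length + 1 := by simpa using hj
    simp only [Function.comp_apply]
    rw [pv_getD_map_range _ _ _ hj']
  · exact trivial
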